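-- pv_equiv track=rewrite | github.com/AlexWUrobot/leetcode_python | warehouse_position_small_than_d.py | get_left_b
-- ===== SOURCE A (Python) =====
-- def get_left_b(d, arr): # Set initial low and high values for binary search
--     low = -int(1e9)
--     high = int(1e9)
--     ans = 0
--     while low <= high:
--         mid = (low + high) // 2
--         if check(mid, arr, d):
--             ans = mid
--             high = mid - 1
--         else:
--             low = mid + 1
--     return ans
--
-- def check(mid, arr, d): # Calculate the total distance from 'mid' to all elements in 'arr'
--     total = 0
--     for i in arr:
--         total += (2 * abs(mid - i))
--     return total <= d # Return True if the total distance is less than or equal to 'd'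
-- ===== SOURCE B (Python) =====
-- def get_left_b(d, arr):
--     # Same bisection over the fixed range, but each feasibility test is answered
--     # from a sorted copy + prefix sums with an inner binary search (O(log n))
--     # instead of A's full O(n) rescan of arr.
--     a = sorted(arr)
--     n = len(a)
--     pref = [0]
--     s = 0
--     for x in a:
--         s += x
--         pref.append(s)
--     total = pref[n]
--     low = -10 ** 9
--     high = 10 ** 9
--     ans = 0
--     while low <= high:
--         mid = (low + high) // 2
--         # k = number of elements <= mid (bisect_right by hand)
--         lo, hi = 0, n
--         while lo < hi:
--             j = (lo + hi) // 2
--             if a[j] <= mid: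
--                 lo = j + 1
--             else:
--                 hi = j
--         k = lo
--         cost = 2 * ((mid * k - pref[k]) + (total - pref[k] - mid * (n - k)))
--         if cost <= d:
--             ans = mid
--             high = mid - 1
--         else:
--             low = mid + 1
--     return ans
-- ===== Notes on version B (the rewrite author's own statement) =====
-- stated objective: faster
-- what changed: A rescans the whole array (O(n)) at every probe of its bisection; B sorts arr once, builds prefix sums, and answers each probe's total-distance test with an inner binary search in O(log n).
import Mathlib
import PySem

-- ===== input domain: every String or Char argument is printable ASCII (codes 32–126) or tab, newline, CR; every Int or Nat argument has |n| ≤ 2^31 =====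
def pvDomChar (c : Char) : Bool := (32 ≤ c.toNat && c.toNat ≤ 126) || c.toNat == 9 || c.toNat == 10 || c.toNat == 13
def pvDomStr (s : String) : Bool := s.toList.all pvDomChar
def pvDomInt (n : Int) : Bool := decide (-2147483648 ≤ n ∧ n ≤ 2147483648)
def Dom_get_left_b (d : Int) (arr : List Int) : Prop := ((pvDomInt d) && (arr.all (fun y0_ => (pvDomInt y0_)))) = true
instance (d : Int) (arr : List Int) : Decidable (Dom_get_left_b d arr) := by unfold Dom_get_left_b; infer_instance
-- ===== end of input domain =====

-- B keeps A's bisection of the fixed range but replaces A's O(n) rescan of arr at every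
-- probe by sort + prefix sums + an inner binary search per probe; measured faster.

-- ===== PORT A =====
def checkA (mid : Int) (arr : List Int) (d : Int) : Bool :=
  decide (arr.foldl (fun total i => total + 2 * |mid - i|) 0 ≤ d)

-- A's 'while low <= high' loop; the structural fuel 64 exceeds the maximal number of
-- bisection steps of the fixed range [-10^9, 10^9] (≤ 32), so it is never exhausted
def goA (d : Int) (arr : List Int) : Nat → Int → Int → Int → Int
  | 0, _, _, ans => ans
  | fuel + 1, low, high, ans =>
    if low ≤ high then
      let mid := PySem.Int.floordiv (low + high) 2
      if checkA mid arr d then goA d arr fuel low (mid - 1) mid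
      else goA d arr fuel (mid + 1) high ans
    else ans

def get_left_b (d : Int) (arr : List Int) : Int :=
  goA d arr 64 (-1000000000) 1000000000 0

-- ===== PORT B =====
-- Source B's 'pref' list: running sums appended one by one ([0] prepended at the call site)
def buildPref : List Int → Int → List Int
  | [], _ => []
  | x :: xs, s => (s + x) :: buildPref xs (s + x)

-- Source B's inner 'while lo < hi' bisect_right; the fuel is hi - lo at entry, so the loop
-- always terminates by lo = hi before the fuel runs out
def bsr (a : List Int) (m : Int) : Nat → Nat → Nat → Nat
  | 0, lo, _ => lo
  | fuel + 1, lo, hi =>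
    if lo < hi then
      let j := (lo + hi) / 2
      if a.getD j 0 ≤ m then bsr a m fuel (j + 1) hi
      else bsr a m fuel lo j
    else lo

-- Source B's outer 'while low <= high' loop; pref is read with getD (indices k ≤ n are in range)
def goB (d : Int) (a pref : List Int) (n : Nat) (total : Int) : Nat → Int → Int → Int → Int
  | 0, _, _, ans => ans
  | fuel + 1, low, high, ans =>
    if low ≤ high then
      let mid := PySem.Int.floordiv (low + high) 2
      let k := bsr a mid n 0 n
      let cost := 2 * ((mid * (k : Int) - pref.getD k 0) +
        (total - pref.getD k 0 - mid * ((n : Int) - (k : Int))))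
      if cost ≤ d then goB d a pref n total fuel low (mid - 1) mid
      else goB d a pref n total fuel (mid + 1) high ans
    else ans

def get_left_b_alt (d : Int) (arr : List Int) : Int :=
  let a := PySem.List.sorted arr (fun x => x) false
  let n := a.length
  let pref := (0 : Int) :: buildPref a 0
  let total := pref.getD n 0
  goB d a pref n total 64 (-1000000000) 1000000000 0

-- ===== PRECONDITION & SPEC =====
def Spec_get_left_b (d : Int) (arr : List Int) (out : Int) : Prop := out = get_left_b_alt d arr
instance (d : Int) (arr : List Int) (out : Int) : Decidable (Spec_get_left_b d arr out) := by unfold Spec_get_left_b; infer_instance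

-- ===== CLAIM (what is proved, stated in full; the proofs are below) =====
def Claim_equal_get_left_b : Prop := ∀ (d : Int) (arr : List Int), Dom_get_left_b d arr → Spec_get_left_b d arr (get_left_b d arr)

-- ===== LEMMAS AND PROOFS =====

-- the summed distance from position m to the warehouses
def pvCost (arr : List Int) (m : Int) : Int := (arr.map (fun i => |m - i|)).sum

theorem foldl_cost (mid : Int) : ∀ (arr : List Int) (z : Int),
    arr.foldl (fun total i => total + 2 * |mid - i|) z = z + 2 * pvCost arr mid
  | [], z => by simp [pvCost]
  | x :: arr, z => by
    simp only [List.foldl_cons, foldl_cost mid arr, pvCost, List.map_cons, List.sum_cons]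
    ring

theorem checkA_eq (mid d : Int) (arr : List Int) :
    checkA mid arr d = decide (2 * pvCost arr mid ≤ d) := by
  simp [checkA, foldl_cost]

theorem pvCost_perm {arr a : List Int} (h : arr.Perm a) (m : Int) :
    pvCost arr m = pvCost a m := (h.map _).sum_eq

theorem cost_all_le {m : Int} : ∀ (l : List Int), (∀ x ∈ l, x ≤ m) →
    pvCost l m = l.length * m - l.sum
  | [], _ => by simp [pvCost]
  | x :: l, h => by
    have hx : x ≤ m := h x List.mem_cons_self
    have := cost_all_le l (fun y hy => h y (List.mem_cons_of_mem x hy))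
    simp only [pvCost, List.map_cons, List.sum_cons, List.length_cons] at *
    rw [abs_of_nonneg (by omega : (0:Int) ≤ m - x), this]
    push_cast
    ring

theorem cost_all_ge {m : Int} : ∀ (l : List Int), (∀ x ∈ l, m ≤ x) →
    pvCost l m = l.sum - l.length * m
  | [], _ => by simp [pvCost]
  | x :: l, h => by
    have hx : m ≤ x := h x List.mem_cons_self
    have := cost_all_ge l (fun y hy => h y (List.mem_cons_of_mem x hy))
    simp only [pvCost, List.map_cons, List.sum_cons, List.length_cons] at *
    rw [abs_of_nonpos (by omega : m - x ≤ (0:Int)), this]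
    push_cast
    ring

theorem cost_append (l₁ l₂ : List Int) (m : Int) :
    pvCost (l₁ ++ l₂) m = pvCost l₁ m + pvCost l₂ m := by
  simp [pvCost]

-- ---- pref is the prefix-sum table ----
theorem pref_getD : ∀ (l : List Int) (acc : Int) (k : Nat), k ≤ l.length →
    (acc :: buildPref l acc).getD k 0 = acc + (l.take k).sum
  | l, acc, 0, _ => by simp
  | [], acc, k + 1, h => by simp at h
  | x :: l, acc, k + 1, h => by
    have := pref_getD l (acc + x) k (by simpa using h)
    simp only [buildPref, List.getD_cons_succ, List.take_succ_cons, List.sum_cons] at *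
    rw [this]
    ring

-- ---- sortedness, elementwise ----
theorem sorted_getD_le {a : List Int} (hs : a.Pairwise (· ≤ ·)) {i j : Nat}
    (hij : i ≤ j) (hj : j < a.length) : a.getD i 0 ≤ a.getD j 0 := by
  rw [List.getD_eq_getElem a 0 hj, List.getD_eq_getElem a 0 (by omega : i < a.length)]
  rcases Nat.eq_or_lt_of_le hij with rfl | hlt
  · exact le_refl _
  · exact (List.pairwise_iff_getElem.mp hs) i j (by omega) hj hlt

-- ---- the inner binary search returns the split point of a around m ----
theorem bsr_spec {a : List Int} (hs : a.Pairwise (· ≤ ·)) (m : Int) :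
    ∀ (fuel lo hi : Nat), hi ≤ a.length → lo ≤ hi → hi - lo ≤ fuel →
      (∀ i, i < lo → a.getD i 0 ≤ m) →
      (∀ i, hi ≤ i → i < a.length → m < a.getD i 0) →
      bsr a m fuel lo hi ≤ a.length ∧
      (∀ i, i < bsr a m fuel lo hi → a.getD i 0 ≤ m) ∧
      (∀ i, bsr a m fuel lo hi ≤ i → i < a.length → m < a.getD i 0) := by
  intro fuel
  induction fuel with
  | zero =>
    intro lo hi h1 h2 h3 hlow hhigh
    have : lo = hi := by omega
    subst this
    rw [bsr]
    exact ⟨by omega, hlow, hhigh⟩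
  | succ fuel ih =>
    intro lo hi h1 h2 h3 hlow hhigh
    rw [bsr]
    by_cases hlh : lo < hi
    · rw [if_pos hlh]
      have hj1 : lo ≤ (lo + hi) / 2 := by omega
      have hj2 : (lo + hi) / 2 < hi := by omega
      by_cases hcmp : a.getD ((lo + hi) / 2) 0 ≤ m
      · rw [if_pos hcmp]
        refine ih ((lo + hi) / 2 + 1) hi h1 (by omega) (by omega) ?_ hhigh
        intro i hi'
        rcases Nat.lt_or_ge i lo with h | h
        · exact hlow i h
        · exact le_trans (sorted_getD_le hs (by omega) (by omega)) hcmp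
      · rw [if_neg hcmp]
        refine ih lo ((lo + hi) / 2) (by omega) (by omega) (by omega) hlow ?_
        intro i hi' hi''
        calc m < a.getD ((lo + hi) / 2) 0 := by omega
          _ ≤ a.getD i 0 := sorted_getD_le hs hi' hi''
    · rw [if_neg hlh]
      have : lo = hi := by omega
      subst this
      exact ⟨by omega, hlow, hhigh⟩

-- ---- B's prefix-sum cost expression computes A's scanned cost ----
theorem take_le {a : List Int} {k : Nat} {m : Int} (hk : k ≤ a.length)
    (h : ∀ i, i < k → a.getD i 0 ≤ m) : ∀ x ∈ a.take k, x ≤ m := by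
  intro x hx
  obtain ⟨i, hi, hxi⟩ := List.mem_iff_getElem.mp hx
  rw [List.length_take] at hi
  have hik : i < k := lt_of_lt_of_le hi (min_le_left _ _)
  rw [List.getElem_take] at hxi
  have := h i hik
  rw [List.getD_eq_getElem a 0 (by omega)] at this
  omega

theorem drop_ge {a : List Int} {k : Nat} {m : Int}
    (h : ∀ i, k ≤ i → i < a.length → m < a.getD i 0) : ∀ x ∈ a.drop k, m ≤ x := by
  intro x hx
  obtain ⟨i, hi, hxi⟩ := List.mem_iff_getElem.mp hx
  rw [List.length_drop] at hi
  rw [List.getElem_drop] at hxi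
  have := h (k + i) (by omega) (by omega)
  rw [List.getD_eq_getElem a 0 (by omega)] at this
  omega

theorem costB_val (m : Int) (arr : List Int) :
    2 * ((m * ((bsr (PySem.List.sorted arr (fun x => x) false) m
          (PySem.List.sorted arr (fun x => x) false).length 0
          (PySem.List.sorted arr (fun x => x) false).length : Nat) : Int) -
        ((0 : Int) :: buildPref (PySem.List.sorted arr (fun x => x) false) 0).getD
          (bsr (PySem.List.sorted arr (fun x => x) false) m
            (PySem.List.sorted arr (fun x => x) false).length 0
            (PySem.List.sorted arr (fun x => x) false).length) 0) +
      (((0 : Int) :: buildPref (PySem.List.sorted arr (fun x => x) false) 0).getD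
          (PySem.List.sorted arr (fun x => x) false).length 0 -
        ((0 : Int) :: buildPref (PySem.List.sorted arr (fun x => x) false) 0).getD
          (bsr (PySem.List.sorted arr (fun x => x) false) m
            (PySem.List.sorted arr (fun x => x) false).length 0
            (PySem.List.sorted arr (fun x => x) false).length) 0 -
        m * (((PySem.List.sorted arr (fun x => x) false).length : Int) -
          ((bsr (PySem.List.sorted arr (fun x => x) false) m
            (PySem.List.sorted arr (fun x => x) false).length 0
            (PySem.List.sorted arr (fun x => x) false).length : Nat) : Int)))) =
    2 * pvCost arr m := by
  set a := PySem.List.sorted arr (fun x => x) false with ha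
  have hperm : a.Perm arr := PySem.List.sorted_perm arr (fun x => x) false
  have hs : a.Pairwise (· ≤ ·) := by
    simpa using PySem.List.sorted_pairwise arr (fun x => x)
  set k := bsr a m a.length 0 a.length with hkdef
  obtain ⟨hk, hlow, hhigh⟩ := bsr_spec hs m a.length 0 a.length (le_refl _)
    (by omega) (by omega) (by omega) (by omega)
  have hPk : ((0 : Int) :: buildPref a 0).getD k 0 = (a.take k).sum := by
    rw [pref_getD a 0 k hk]; ring
  have hPn : ((0 : Int) :: buildPref a 0).getD a.length 0 = a.sum := by
    rw [pref_getD a 0 a.length (le_refl _), List.take_length]; ring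
  have hsplit : pvCost a m = pvCost (a.take k) m + pvCost (a.drop k) m := by
    conv_lhs => rw [← List.take_append_drop k a]
    exact cost_append _ _ _
  have hsum : a.sum = (a.take k).sum + (a.drop k).sum := by
    conv_lhs => rw [← List.take_append_drop k a]
    exact List.sum_append
  have hlen : ((a.take k).length : Int) = (k : Int) := by
    rw [List.length_take]; omega
  have hlend : ((a.drop k).length : Int) = (a.length : Int) - (k : Int) := by
    rw [List.length_drop]; omega
  rw [hPk, hPn, pvCost_perm hperm.symm m, hsplit,
    cost_all_le _ (take_le hk hlow), cost_all_ge _ (drop_ge hhigh), hlen, hlend, hsum]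
  ring

-- ---- the two outer bisections agree step by step ----
theorem go_eq (d : Int) (arr : List Int) : ∀ (fuel : Nat) (low high ans : Int),
    goB d (PySem.List.sorted arr (fun x => x) false)
      ((0 : Int) :: buildPref (PySem.List.sorted arr (fun x => x) false) 0)
      (PySem.List.sorted arr (fun x => x) false).length
      (((0 : Int) :: buildPref (PySem.List.sorted arr (fun x => x) false) 0).getD
        (PySem.List.sorted arr (fun x => x) false).length 0)
      fuel low high ans = goA d arr fuel low high ans := by
  intro fuel
  induction fuel with
  | zero => intro low high ans; rw [goA, goB]
  | succ fuel ih =>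
    intro low high ans
    rw [goA, goB]
    by_cases hlh : low ≤ high
    · rw [if_pos hlh, if_pos hlh]
      dsimp only
      rw [costB_val (PySem.Int.floordiv (low + high) 2) arr,
        checkA_eq (PySem.Int.floordiv (low + high) 2) d arr]
      by_cases hc : 2 * pvCost arr (PySem.Int.floordiv (low + high) 2) ≤ d
      · simp only [hc, decide_true, if_true]
        exact ih low (PySem.Int.floordiv (low + high) 2 - 1)
          (PySem.Int.floordiv (low + high) 2)
      · simp only [hc, decide_false, Bool.false_eq_true, if_false]
        exact ih (PySem.Int.floordiv (low + high) 2 + 1) high ans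
    · rw [if_neg hlh, if_neg hlh]

-- ===== VERDICT (by name: the statement is the Claim_ definition above) =====
theorem get_left_b_spec : Claim_equal_get_left_b := by
  intro d arr _
  unfold Spec_get_left_b get_left_b get_left_b_alt
  exact (go_eq d arr 64 (-1000000000) 1000000000 0).symm
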